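-- pv_equiv track=rewrite | github.com/Ben-Wu/ShrugProgrammingLanguage | shrug_lang/tokenizer.py | join_strings
-- ===== SOURCE A (Python) =====
-- from typing import List
--
-- def join_strings(unparsed_tokens: List[str]):
--     """Join strings that have spaces in them"""
--     new_unparsed = []
--     reading_string = False
--     current_string = []
--     for unparsed_token in unparsed_tokens:
--         if reading_string:
--             if unparsed_token.endswith('"'):
--                 reading_string = False
--                 current_string.append(unparsed_token)
--                 new_unparsed.append(' '.join(current_string))
--                 current_string.clear()
--             else:
--                 current_string.append(unparsed_token)
--         elif (unparsed_token.startswith('"') and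
--               (len(unparsed_token) == 1 or
--                not unparsed_token.endswith('"'))):
--             reading_string = True
--             current_string.append(unparsed_token)
--         else:
--             new_unparsed.append(unparsed_token)
--     if len(current_string):
--         new_unparsed.append(' '.join(current_string))
--     return new_unparsed
-- ===== SOURCE B (Python) =====
-- from typing import List
--
-- def join_strings(unparsed_tokens: List[str]):
--     """Join strings that have spaces in them"""
--     new_unparsed = []
--     i = 0
--     n = len(unparsed_tokens)
--     while i < n:
--         tok = unparsed_tokens[i]
--         if tok.startswith('"') and (len(tok) == 1 or not tok.endswith('"')):
--             # scan forward for the first token that ends the quoted string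
--             j = i + 1
--             while j < n and not unparsed_tokens[j].endswith('"'):
--                 j += 1
--             if j < n:
--                 new_unparsed.append(' '.join(unparsed_tokens[i:j + 1]))
--                 i = j + 1
--             else:
--                 new_unparsed.append(' '.join(unparsed_tokens[i:]))
--                 i = n
--         else:
--             new_unparsed.append(tok)
--             i += 1
--     return new_unparsed
-- ===== Notes on version B (the rewrite author's own statement) =====
-- stated objective: alternative
-- what changed: Replaces A's single-pass state machine (reading_string flag with an accumulating current_string buffer and a post-loop flush) by an index loop that, at each string-start token, scans forward with an inner loop to the closing token and joins the inclusive slice in one step.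
import Mathlib
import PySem

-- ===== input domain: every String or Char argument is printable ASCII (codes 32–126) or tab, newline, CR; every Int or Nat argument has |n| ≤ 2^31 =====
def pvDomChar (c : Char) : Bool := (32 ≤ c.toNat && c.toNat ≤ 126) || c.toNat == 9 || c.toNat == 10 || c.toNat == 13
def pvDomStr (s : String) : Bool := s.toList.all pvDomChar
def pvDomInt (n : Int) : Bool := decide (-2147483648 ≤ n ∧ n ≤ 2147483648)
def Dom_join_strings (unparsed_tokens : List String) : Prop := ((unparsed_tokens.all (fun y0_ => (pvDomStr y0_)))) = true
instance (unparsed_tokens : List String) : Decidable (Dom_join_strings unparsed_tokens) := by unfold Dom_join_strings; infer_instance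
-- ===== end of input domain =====

-- B replaces A's reading_string state machine by an index loop with an inner forward
-- scan to the closing quote; same cost, different decomposition (objective: alternative).

-- ===== PORT A =====
-- loop state: (new_unparsed, reading_string, current_string)
def joinStringsStep (st : List String × Bool × List String) (t : String) :
    List String × Bool × List String :=
  let (nu, reading, cs) := st
  if reading then
    if PySem.Str.endswith t "\"" then
      (nu ++ [PySem.Str.join " " (cs ++ [t])], false, [])
    else
      (nu, true, cs ++ [t])
  else if PySem.Str.startswith t "\"" &&
          (PySem.Str.len t == 1 || !PySem.Str.endswith t "\"") then
    (nu, true, cs ++ [t])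
  else
    (nu ++ [t], false, cs)

def join_strings (unparsed_tokens : List String) : List String :=
  let (nu, _, cs) := unparsed_tokens.foldl joinStringsStep ([], false, [])
  if cs.length ≠ 0 then nu ++ [PySem.Str.join " " cs] else nu

-- ===== PORT B =====
-- inner scan: split off the group up to and including the first token ending with '"'
def scanClose : List String → Option (List String × List String)
  | [] => none
  | t :: r =>
    if PySem.Str.endswith t "\"" then some ([t], r)
    else (scanClose r).map (fun p => (t :: p.1, p.2))

theorem scanClose_length {l : List String} {g r : List String}
    (h : scanClose l = some (g, r)) : r.length < l.length := by
  induction l generalizing g r with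
  | nil => simp [scanClose] at h
  | cons t tl ih =>
    simp only [scanClose] at h
    split at h
    · cases h; simp
    · cases hs : scanClose tl with
      | none => simp [hs] at h
      | some p =>
        obtain ⟨g1, r1⟩ := p
        simp [hs] at h
        obtain ⟨h1, h2⟩ := h
        have := ih hs
        subst h2; simp; omega

def joinStringsGo : List String → List String
  | [] => []
  | t :: rest =>
    if PySem.Str.startswith t "\"" &&
       (PySem.Str.len t == 1 || !PySem.Str.endswith t "\"") then
      match h : scanClose rest with
      | some (g, rr) => PySem.Str.join " " (t :: g) :: joinStringsGo rr
      | none => [PySem.Str.join " " (t :: rest)]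
    else
      t :: joinStringsGo rest
termination_by l => l.length
decreasing_by
  · exact Nat.lt_succ_of_lt (scanClose_length h)
  · simp

def join_strings_alt (unparsed_tokens : List String) : List String :=
  joinStringsGo unparsed_tokens

-- ===== PRECONDITION & SPEC =====
def Spec_join_strings (unparsed_tokens : List String) (out : List String) : Prop := out = join_strings_alt unparsed_tokens
instance (unparsed_tokens : List String) (out : List String) : Decidable (Spec_join_strings unparsed_tokens out) := by unfold Spec_join_strings; infer_instance

-- ===== CLAIM (what is proved, stated in full; the proofs are below) =====
def Claim_equal_join_strings : Prop := ∀ (unparsed_tokens : List String), Dom_join_strings unparsed_tokens → Spec_join_strings unparsed_tokens (join_strings unparsed_tokens)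

-- ===== LEMMAS AND PROOFS =====

def pvFinalize (st : List String × Bool × List String) : List String :=
  if st.2.2.length ≠ 0 then st.1 ++ [PySem.Str.join " " st.2.2] else st.1

theorem join_strings_eq_finalize (ts : List String) :
    join_strings ts = pvFinalize (ts.foldl joinStringsStep ([], false, [])) := by
  unfold join_strings pvFinalize
  rcases ts.foldl joinStringsStep ([], false, []) with ⟨nu, b, cs⟩
  simp

theorem go_cons_start_some {t : String} {rest g rr : List String}
    (h1 : (PySem.Str.startswith t "\"" &&
        (PySem.Str.len t == 1 || !PySem.Str.endswith t "\"")) = true)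
    (h2 : scanClose rest = some (g, rr)) :
    joinStringsGo (t :: rest) =
      PySem.Str.join " " (t :: g) :: joinStringsGo rr := by
  rw [joinStringsGo.eq_def]
  dsimp only
  rw [if_pos h1]
  split
  · rename_i g' rr' heq
    rw [h2] at heq; cases heq; rfl
  · rename_i heq
    rw [h2] at heq; cases heq

theorem go_cons_start_none {t : String} {rest : List String}
    (h1 : (PySem.Str.startswith t "\"" &&
        (PySem.Str.len t == 1 || !PySem.Str.endswith t "\"")) = true)
    (h2 : scanClose rest = none) :
    joinStringsGo (t :: rest) = [PySem.Str.join " " (t :: rest)] := by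
  rw [joinStringsGo.eq_def]
  dsimp only
  rw [if_pos h1]
  split
  · rename_i g' rr' heq
    rw [h2] at heq; cases heq
  · rfl

theorem go_cons_notstart {t : String} {rest : List String}
    (h1 : ¬ (PySem.Str.startswith t "\"" &&
        (PySem.Str.len t == 1 || !PySem.Str.endswith t "\"")) = true) :
    joinStringsGo (t :: rest) = t :: joinStringsGo rest := by
  rw [joinStringsGo.eq_def]
  dsimp only
  rw [if_neg h1]

-- A's loop from the reading state, characterised by scanClose
theorem foldl_reading (ts : List String) (nu cs : List String) :
    ts.foldl joinStringsStep (nu, true, cs) =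
      match scanClose ts with
      | some (g, rr) =>
          rr.foldl joinStringsStep (nu ++ [PySem.Str.join " " (cs ++ g)], false, [])
      | none => (nu, true, cs ++ ts) := by
  induction ts generalizing nu cs with
  | nil => simp [scanClose]
  | cons t tl ih =>
    rw [List.foldl_cons]
    dsimp only [joinStringsStep]
    simp only [if_true, scanClose]
    by_cases he : PySem.Str.endswith t "\"" = true
    · rw [if_pos he, if_pos he]
    · rw [if_neg he, if_neg he]
      rw [ih]
      cases hs : scanClose tl with
      | none => simp
      | some p => simp [List.append_assoc]

-- A's loop from the neutral state produces B's result
theorem foldl_neutral (ts : List String) (nu : List String) :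
    pvFinalize (ts.foldl joinStringsStep (nu, false, [])) = nu ++ joinStringsGo ts := by
  induction hn : ts.length using Nat.strong_induction_on generalizing ts nu with
  | _ n ih =>
  cases ts with
  | nil => simp [joinStringsGo, pvFinalize]
  | cons t tl =>
    by_cases hst : (PySem.Str.startswith t "\"" &&
        (PySem.Str.len t == 1 || !PySem.Str.endswith t "\"")) = true
    · rw [List.foldl_cons]
      dsimp only [joinStringsStep]
      simp only [Bool.false_eq_true, if_false, List.nil_append]
      rw [if_pos hst]
      rw [foldl_reading]
      cases hs : scanClose tl with
      | none =>
        rw [go_cons_start_none hst hs]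
        simp [pvFinalize]
      | some p =>
        obtain ⟨g, rr⟩ := p
        have hlt : rr.length < n := by
          have := scanClose_length hs; subst hn; simp at this ⊢; omega
        rw [ih rr.length hlt rr _ rfl]
        rw [go_cons_start_some hst hs]
        simp
    · rw [List.foldl_cons]
      dsimp only [joinStringsStep]
      simp only [Bool.false_eq_true, if_false, List.nil_append]
      rw [if_neg hst]
      rw [ih tl.length (by subst hn; simp) tl _ rfl]
      rw [go_cons_notstart hst]
      simp

-- ===== VERDICT (by name: the statement is the Claim_ definition above) =====
theorem join_strings_spec : Claim_equal_join_strings := by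
  intro ts _
  unfold Spec_join_strings join_strings_alt
  rw [join_strings_eq_finalize, foldl_neutral]
  simp
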